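-- pv_equiv track=rewrite | github.com/denballakh/ranger-tools | rangers/common.py | convert_ini_to_dict
-- ===== SOURCE A (Python) =====
-- def convert_ini_to_dict(content: str) -> dict[str, str]:
--     result = dict[str, str]()
--     for s in content.split('\n'):
--         if not s.strip():
--             continue
--         if '=' not in s:
--             continue
--         if s.startswith('#'):
--             continue
--
--         key, val = s.split('=', 1)
--         if key in result:
--             result[key] += '\n' + val
--         else:
--             result[key] = val
--     return result
-- ===== SOURCE B (Python) =====
-- def convert_ini_to_dict(content: str) -> dict[str, str]:
--     # pass 1: collect the (key, val) pairs of all accepted lines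
--     pairs = []
--     for s in content.split('\n'):
--         if s.strip() and '=' in s and not s.startswith('#'):
--             key, val = s.split('=', 1)
--             pairs.append((key, val))
--     # pass 2: for each key at its first occurrence, gather ALL its values at once
--     result: dict[str, str] = {}
--     for key, _ in pairs:
--         if key not in result:
--             result[key] = '\n'.join(v for k, v in pairs if k == key)
--     return result
-- ===== Notes on version B (the rewrite author's own statement) =====
-- stated objective: alternative
-- what changed: B is two staged passes: it first parses all accepted lines into a list of (key, val) pairs, then builds the dict by scanning that list and, at each key's first occurrence, gathering all of that key's values in one inner scan and joining them with newlines, instead of A's single pass that grows each entry's string in the dict as lines arrive.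
import Mathlib
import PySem

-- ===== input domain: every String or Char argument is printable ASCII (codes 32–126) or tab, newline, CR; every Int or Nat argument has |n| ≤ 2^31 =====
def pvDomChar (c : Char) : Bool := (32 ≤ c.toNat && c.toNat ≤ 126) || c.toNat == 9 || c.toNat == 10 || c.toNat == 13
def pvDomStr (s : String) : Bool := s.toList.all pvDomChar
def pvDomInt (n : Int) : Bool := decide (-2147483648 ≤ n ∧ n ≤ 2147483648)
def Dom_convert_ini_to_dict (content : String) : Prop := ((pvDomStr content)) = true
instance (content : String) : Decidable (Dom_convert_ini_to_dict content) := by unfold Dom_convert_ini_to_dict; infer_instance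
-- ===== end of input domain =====

-- B parses accepted lines into a (key, val) pair list first, then builds the dict in a second
-- staged pass that gathers and newline-joins all of a key's values at its first occurrence,
-- instead of A's single pass that re-concatenates onto the growing dict entry; same return value.


-- ===== PORT A =====
-- loop body of A: the three skip guards, then split on '=' once and concatenate onto the entry
def iniStepA (result : PySem.Dict String String) (s : String) : PySem.Dict String String :=
  if PySem.Str.strip s = "" then result
  else if PySem.Str.isIn "=" s = false then result
  else if PySem.Str.startswith s "#" then result
  else
    match PySem.Str.splitMax? s "=" 1 with
    | some [key, val] =>
        if result.contains key then result.insert key (result.getD key "" ++ "\n" ++ val)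
        else result.insert key val
    | _ => result  -- unreachable: with '=' in s, split(s, '=', 1) has exactly two pieces

-- split? is some here since the separator "\n" is nonempty
def convert_ini_to_dict (content : String) : List (String × String) :=
  (((PySem.Str.split? content "\n").getD []).foldl iniStepA PySem.Dict.empty).items

-- ===== PORT B =====
-- B's first loop body: keep a line iff it passes the combined guard, yielding its (key, val)
def iniParse? (s : String) : Option (String × String) :=
  if PySem.Str.strip s ≠ "" ∧ PySem.Str.isIn "=" s = true ∧ PySem.Str.startswith s "#" = false then
    match PySem.Str.splitMax? s "=" 1 with
    | some [key, val] => some (key, val)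
    | _ => none  -- unreachable ('=' is in s): match totality only
  else none

-- the gathered value of a key: '\n'.join(v for k, v in pairs if k == key)
def gatherVal (pairs : List (String × String)) (k : String) : String :=
  PySem.Str.join "\n" ((pairs.filter (fun q => q.1 == k)).map (·.2))

-- B's second loop body: a key's first occurrence gathers all its values from pairs at once
def iniGather (pairs : List (String × String)) (result : PySem.Dict String String)
    (p : String × String) : PySem.Dict String String :=
  if result.contains p.1 then result else result.insert p.1 (gatherVal pairs p.1)

def convert_ini_to_dict_alt (content : String) : List (String × String) :=
  let pairs := ((PySem.Str.split? content "\n").getD []).filterMap iniParse?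
  (pairs.foldl (iniGather pairs) PySem.Dict.empty).items

-- ===== PRECONDITION & SPEC =====
def Spec_convert_ini_to_dict (content : String) (out : List (String × String)) : Prop := out = convert_ini_to_dict_alt content
instance (content : String) (out : List (String × String)) : Decidable (Spec_convert_ini_to_dict content out) := by unfold Spec_convert_ini_to_dict; infer_instance

-- ===== CLAIM (what is proved, stated in full; the proofs are below) =====
def Claim_equal_convert_ini_to_dict : Prop := ∀ (content : String), Dom_convert_ini_to_dict content → Spec_convert_ini_to_dict content (convert_ini_to_dict content)

-- ===== LEMMAS AND PROOFS =====

-- A's step re-expressed over a parsed pair (merged single-insert form)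
def pairStepA (d : PySem.Dict String String) (p : String × String) : PySem.Dict String String :=
  d.insert p.1 (if d.contains p.1 then d.getD p.1 "" ++ "\n" ++ p.2 else p.2)

theorem str_ext (a b : String) (h : a.toList = b.toList) : a = b := by
  have := congrArg String.ofList h
  simpa using this

theorem chars_join_append (sep : List Char) (l : List (List Char)) (x : List Char) (h : l ≠ []) :
    PySem.Chars.join sep (l ++ [x]) = PySem.Chars.join sep l ++ sep ++ x := by
  induction l with
  | nil => exact absurd rfl h
  | cons a t ih =>
      cases t with
      | nil => simp [PySem.Chars.join_cons_cons, PySem.Chars.join_singleton]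
      | cons b t' =>
          simp only [List.cons_append]
          rw [PySem.Chars.join_cons_cons]
          have ihx := ih (by simp)
          simp only [List.cons_append] at ihx
          rw [ihx, PySem.Chars.join_cons_cons]
          simp [List.append_assoc]

theorem join_singleton_str (v : String) : PySem.Str.join "\n" [v] = v := by
  apply str_ext
  simp [PySem.Str.toList_join, PySem.Chars.join_singleton]

theorem join_append_singleton (vs : List String) (v : String) (h : vs ≠ []) :
    PySem.Str.join "\n" (vs ++ [v]) = PySem.Str.join "\n" vs ++ "\n" ++ v := by
  apply str_ext
  simp only [PySem.Str.toList_join, List.map_append, List.map_cons, List.map_nil]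
  rw [chars_join_append _ _ _ (by simpa using h)]
  simp

-- A's line step is pairStepA after parsing
theorem stepA_eq (d : PySem.Dict String String) (s : String) :
    iniStepA d s = (match iniParse? s with | none => d | some p => pairStepA d p) := by
  by_cases h1 : PySem.Str.strip s = ""
  · unfold iniStepA iniParse?
    rw [if_pos h1, if_neg (fun h => h.1 h1)]
  · by_cases h2 : PySem.Str.isIn "=" s = false
    · unfold iniStepA iniParse?
      rw [if_neg h1, if_pos h2,
        if_neg (fun h => by rw [h2] at h; cases h.2.1)]
    · by_cases h3 : PySem.Str.startswith s "#" = true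
      · unfold iniStepA iniParse?
        rw [if_neg h1, if_neg h2, if_pos h3,
          if_neg (fun h => by rw [h3] at h; cases h.2.2)]
      · have hC : PySem.Str.strip s ≠ "" ∧ PySem.Str.isIn "=" s = true ∧
            PySem.Str.startswith s "#" = false := by
          refine ⟨h1, ?_, ?_⟩
          · cases hx : PySem.Str.isIn "=" s
            · exact absurd hx h2
            · rfl
          · cases hx : PySem.Str.startswith s "#"
            · rfl
            · exact absurd hx h3
        unfold iniStepA iniParse?
        rw [if_neg h1, if_neg h2, if_neg h3, if_pos hC]
        cases hsp : PySem.Str.splitMax? s "=" 1 with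
        | none => rfl
        | some pieces =>
            match pieces with
            | [] => rfl
            | [_] => rfl
            | _ :: _ :: _ :: _ => rfl
            | [key, val] =>
                show (if d.contains key = true then _ else _) = pairStepA d (key, val)
                unfold pairStepA
                by_cases hc : d.contains key = true
                · rw [if_pos hc]; rw [if_pos hc]
                · rw [if_neg hc]; rw [if_neg hc]

theorem foldA_eq (lines : List String) (d : PySem.Dict String String) :
    lines.foldl iniStepA d = (lines.filterMap iniParse?).foldl pairStepA d := by
  induction lines generalizing d with
  | nil => rfl
  | cons s rest ih =>
      simp only [List.foldl_cons, List.filterMap_cons]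
      rw [stepA_eq]
      cases iniParse? s with
      | none => exact ih d
      | some p => simpa using ih (pairStepA d p)

theorem filter_key_nil (ps : List (String × String)) (k : String)
    (h : k ∉ ps.map (·.1)) : ps.filter (fun q => q.1 == k) = [] := by
  rw [List.filter_eq_nil_iff]
  intro q hq
  simp only [beq_iff_eq]
  intro hqk
  exact h (List.mem_map.mpr ⟨q, hq, hqk⟩)

theorem filter_key_ne_nil (ps : List (String × String)) (k : String)
    (h : k ∈ ps.map (·.1)) : ps.filter (fun q => q.1 == k) ≠ [] := by
  obtain ⟨q, hq, hqk⟩ := List.mem_map.mp h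
  exact List.ne_nil_of_mem (List.mem_filter.mpr ⟨hq, by simp [hqk]⟩)

theorem gatherVal_append_self (ps : List (String × String)) (p : String × String)
    (h : p.1 ∈ ps.map (·.1)) :
    gatherVal (ps ++ [p]) p.1 = gatherVal ps p.1 ++ "\n" ++ p.2 := by
  unfold gatherVal
  rw [List.filter_append, List.map_append]
  have h1 : List.filter (fun q => q.1 == p.1) [p] = [p] := by simp
  rw [h1]
  have h2 : List.map (fun x : String × String => x.2) [p] = [p.2] := rfl
  rw [h2, join_append_singleton _ _ (by simpa using filter_key_ne_nil ps p.1 h)]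

theorem gatherVal_append_fresh (ps : List (String × String)) (p : String × String)
    (h : p.1 ∉ ps.map (·.1)) : gatherVal (ps ++ [p]) p.1 = p.2 := by
  unfold gatherVal
  rw [List.filter_append, filter_key_nil ps p.1 h]
  simpa using join_singleton_str p.2

theorem gatherVal_append_other (ps : List (String × String)) (p : String × String) (k : String)
    (h : k ≠ p.1) : gatherVal (ps ++ [p]) k = gatherVal ps k := by
  unfold gatherVal
  rw [List.filter_append]
  have : [p].filter (fun q => q.1 == k) = [] := by
    simp [Ne.symm h]
  rw [this, List.append_nil]

-- characterization of A's fold: membership and the value at each present key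
theorem foldA_char (ps : List (String × String)) :
    ∀ (k : String),
      ((ps.foldl pairStepA PySem.Dict.empty).contains k = decide (k ∈ ps.map (·.1)))
      ∧ (k ∈ ps.map (·.1) →
          (ps.foldl pairStepA PySem.Dict.empty).getD k "" = gatherVal ps k) := by
  induction ps using List.reverseRecOn with
  | nil => intro k; simp [PySem.Dict.contains_empty]
  | append_singleton ps p ih =>
      intro k
      rw [List.foldl_append]
      simp only [List.foldl_cons, List.foldl_nil]
      set D := ps.foldl pairStepA PySem.Dict.empty with hD
      constructor
      · show (pairStepA D p).contains k = _
        unfold pairStepA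
        rw [PySem.Dict.contains_insert, (ih k).1]
        by_cases hk : k = p.1
        · simp [hk]
        · have hbk : (k == p.1) = false := by simp [hk]
          have hd : decide (k ∈ (ps ++ [p]).map (·.1)) = decide (k ∈ ps.map (·.1)) :=
            decide_eq_decide.mpr (by simp [hk])
          rw [hbk, Bool.false_or, hd]
      · intro hmem
        show (pairStepA D p).getD k "" = _
        unfold pairStepA
        rw [PySem.Dict.getD_insert]
        by_cases hk : k = p.1
        · rw [if_pos hk]
          subst hk
          by_cases hc : p.1 ∈ ps.map (·.1)
          · have hct : D.contains p.1 = true := by rw [(ih p.1).1]; simpa using hc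
            rw [if_pos hct, (ih p.1).2 hc, gatherVal_append_self ps p hc]
          · have hcf : D.contains p.1 = false := by rw [(ih p.1).1]; simpa using hc
            rw [hcf]
            simpa using (gatherVal_append_fresh ps p hc).symm
        · rw [if_neg hk, gatherVal_append_other ps p k hk]
          have : k ∈ ps.map (·.1) := by
            simp only [List.map_append] at hmem
            rcases List.mem_append.mp hmem with h | h
            · exact h
            · simp at h; exact absurd h hk
          exact (ih k).2 this

-- keys of A's fold, in first-insertion order
theorem keysA (ps : List (String × String)) :
    (ps.foldl pairStepA PySem.Dict.empty).keys = PySem.Set.ofList (ps.map (·.1)) := by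
  have h := PySem.Dict.keys_foldl_insert_key (l := ps) (key := Prod.fst)
    (f := fun d p => if d.contains p.1 then d.getD p.1 "" ++ "\n" ++ p.2 else p.2)
    (d := PySem.Dict.empty)
  have he : (PySem.Dict.empty : PySem.Dict String String).keys = [] := rfl
  rw [he] at h
  calc (ps.foldl pairStepA PySem.Dict.empty).keys
      = (ps.foldl (fun d p => d.insert p.1 (if d.contains p.1 then d.getD p.1 "" ++ "\n" ++ p.2 else p.2)) PySem.Dict.empty).keys := rfl
    _ = PySem.Set.update [] (ps.map Prod.fst) := h
    _ = PySem.Set.ofList (ps.map (·.1)) := PySem.Set.update_nil_left _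

theorem iniGather_of_contains (full : List (String × String)) (d : PySem.Dict String String)
    (p : String × String) (hc : d.contains p.1 = true) : iniGather full d p = d := by
  unfold iniGather; rw [if_pos hc]

theorem iniGather_of_not_contains (full : List (String × String)) (d : PySem.Dict String String)
    (p : String × String) (hc : ¬ d.contains p.1 = true) :
    iniGather full d p = d.insert p.1 (gatherVal full p.1) := by
  unfold iniGather; rw [if_neg hc]

-- characterization of B's fold (the gather pass), generalized over the start dict
theorem foldB_char (full : List (String × String)) (done : List (String × String)) :
    ∀ (d : PySem.Dict String String) (k : String),
      ((done.foldl (iniGather full) d).contains k = (d.contains k || decide (k ∈ done.map (·.1))))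
      ∧ ((done.foldl (iniGather full) d).getD k "" =
          if d.contains k then d.getD k "" else
            if k ∈ done.map (·.1) then gatherVal full k else "") := by
  induction done with
  | nil =>
      intro d k
      refine ⟨by simp, ?_⟩
      by_cases hc : d.contains k = true
      · simp [hc]
      · simp only [List.foldl_nil, List.map_nil, List.not_mem_nil, if_false, hc]
        exact PySem.Dict.getD_of_not_contains _ _ (eq_false_of_ne_true hc)
  | cons p rest ih =>
      intro d k
      simp only [List.foldl_cons]
      by_cases hc : d.contains p.1 = true
      · rw [iniGather_of_contains full d p hc]
        obtain ⟨ih1, ih2⟩ := ih d k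
        refine ⟨?_, ?_⟩
        · rw [ih1]
          by_cases hk : k = p.1
          · subst hk; simp [hc]
          · congr 1
            exact (decide_eq_decide.mpr (by simp [hk])).symm
        · rw [ih2]
          by_cases hk : k = p.1
          · subst hk; simp [hc]
          · split_ifs with h5 h6 h7 <;> simp_all [List.map_cons, List.mem_cons]
      · rw [iniGather_of_not_contains full d p hc]
        obtain ⟨ih1, ih2⟩ := ih (d.insert p.1 (gatherVal full p.1)) k
        refine ⟨?_, ?_⟩
        · rw [ih1, PySem.Dict.contains_insert]
          by_cases hk : k = p.1
          · subst hk; simp [List.map_cons]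
          · have hbk : (k == p.1) = false := by simp [hk]
            rw [hbk, Bool.false_or]
            congr 1
            exact (decide_eq_decide.mpr (by simp [hk])).symm
        · rw [ih2, PySem.Dict.contains_insert, PySem.Dict.getD_insert]
          by_cases hk : k = p.1
          · subst hk
            simp [List.map_cons, eq_false_of_ne_true hc]
          · have hbk : (k == p.1) = false := by simp [hk]
            simp only [if_neg hk, hbk, Bool.false_or]
            by_cases hck : d.contains k = true
            · simp [hck]
            · simp only [eq_false_of_ne_true hck, Bool.false_eq_true, if_false]
              split_ifs with h5 h6 <;> simp_all [List.map_cons, List.mem_cons]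

-- keys of B's fold, in first-insertion order
theorem keysB (full : List (String × String)) (done : List (String × String)) :
    ∀ (d : PySem.Dict String String),
      (done.foldl (iniGather full) d).keys = PySem.Set.update d.keys (done.map (·.1)) := by
  induction done with
  | nil => intro d; simp [PySem.Set.update_nil]
  | cons p rest ih =>
      intro d
      simp only [List.foldl_cons, List.map_cons]
      rw [PySem.Set.update_cons]
      by_cases hc : d.contains p.1 = true
      · rw [iniGather_of_contains full d p hc, ih d]
        congr 1
        rw [PySem.Set.add_of_mem]
        exact (PySem.Dict.contains_iff_mem_keys _ _).mp hc
      · rw [iniGather_of_not_contains full d p hc, ih _]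
        congr 1
        rw [PySem.Set.add_of_not_mem, PySem.Dict.keys_insert_of_not_contains (h := eq_false_of_ne_true hc)]
        intro hmem
        exact hc ((PySem.Dict.contains_iff_mem_keys _ _).mpr hmem)

-- the two folds produce identical item lists
theorem folds_eq (ps : List (String × String)) :
    (ps.foldl pairStepA PySem.Dict.empty).items = (ps.foldl (iniGather ps) PySem.Dict.empty).items := by
  have hkA : (ps.foldl pairStepA PySem.Dict.empty).keys = PySem.Set.ofList (ps.map (·.1)) := keysA ps
  have hkB : (ps.foldl (iniGather ps) PySem.Dict.empty).keys = PySem.Set.ofList (ps.map (·.1)) := by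
    rw [keysB ps ps PySem.Dict.empty]
    exact PySem.Set.update_nil_left _
  have hndA : (ps.foldl pairStepA PySem.Dict.empty).keys.Nodup := by
    rw [hkA]; exact PySem.Set.nodup_ofList _
  have hndB : (ps.foldl (iniGather ps) PySem.Dict.empty).keys.Nodup := by
    rw [hkB]; exact PySem.Set.nodup_ofList _
  rw [PySem.Dict.items_eq_map_keys _ hndA "", PySem.Dict.items_eq_map_keys _ hndB "", hkA, hkB]
  apply List.map_congr_left
  intro k hk
  have hkm : k ∈ ps.map (·.1) := (PySem.Set.mem_ofList _ _).mp hk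
  have hA := (foldA_char ps k).2 hkm
  have hB := ((foldB_char ps ps) PySem.Dict.empty k).2
  rw [hA, hB]
  simp [PySem.Dict.contains_empty, hkm]

-- ===== VERDICT (by name: the statement is the Claim_ definition above) =====
theorem convert_ini_to_dict_spec : Claim_equal_convert_ini_to_dict := by
  intro content _
  unfold Spec_convert_ini_to_dict convert_ini_to_dict convert_ini_to_dict_alt
  rw [foldA_eq]
  exact folds_eq _
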